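-- pv_equiv track=rewrite | github.com/Mamontosik/Terminal_telegram_filefinder2 | TerminalBot_repeat.py | count_repeating_letters
-- ===== SOURCE A (Python) =====
-- def count_repeating_letters(word):
--     seen = {}
--     count = 0
--     for index, letter in enumerate(word):
--         if letter in seen:
--             count += 1
--         seen[letter] = index
--     return count
-- ===== SOURCE B (Python) =====
-- def count_repeating_letters(word):
--     return len(word) - len(set(word))
-- ===== Notes on version B (the rewrite author's own statement) =====
-- stated objective: simpler
-- what changed: Replaces the stateful enumerate/dict scan with the closed form len(word) - len(set(word)) (each character counts exactly when it is not a first occurrence); the C-level set constructor removes the per-character Python branch.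
import Mathlib
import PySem

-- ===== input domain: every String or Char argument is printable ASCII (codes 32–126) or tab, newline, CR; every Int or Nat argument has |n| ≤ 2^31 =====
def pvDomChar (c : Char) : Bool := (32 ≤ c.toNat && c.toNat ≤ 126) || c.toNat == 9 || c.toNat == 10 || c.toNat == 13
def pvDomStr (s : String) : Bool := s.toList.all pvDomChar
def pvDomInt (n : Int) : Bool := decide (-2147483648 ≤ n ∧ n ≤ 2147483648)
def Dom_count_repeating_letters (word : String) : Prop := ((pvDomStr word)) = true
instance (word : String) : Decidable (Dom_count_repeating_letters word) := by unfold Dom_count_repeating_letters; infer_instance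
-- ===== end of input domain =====

-- B replaces A's dict-and-counter scan by the closed form len(word) - len(set(word)); equal on all inputs (objective: simpler).

-- ===== PORT A =====
-- the loop body: check membership in the old dict, bump count, then store the index
def pvStepA (st : PySem.Dict Char Int × Int) (p : Int × Char) : PySem.Dict Char Int × Int :=
  ((st.1.insert p.2 p.1), if st.1.contains p.2 then st.2 + 1 else st.2)

def count_repeating_letters (word : String) : Int :=
  ((PySem.List.enumerate word.toList 0).foldl pvStepA (PySem.Dict.empty, 0)).2

-- ===== PORT B =====
def count_repeating_letters_alt (word : String) : Int :=
  (word.toList.length : Int) - ((PySem.Set.ofList word.toList).length : Int)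

-- ===== PRECONDITION & SPEC =====
def Spec_count_repeating_letters (word : String) (out : Int) : Prop := out = count_repeating_letters_alt word
instance (word : String) (out : Int) : Decidable (Spec_count_repeating_letters word out) := by unfold Spec_count_repeating_letters; infer_instance

-- ===== CLAIM (what is proved, stated in full; the proofs are below) =====
def Claim_equal_count_repeating_letters : Prop := ∀ (word : String), Dom_count_repeating_letters word → Spec_count_repeating_letters word (count_repeating_letters word)

-- ===== LEMMAS AND PROOFS =====
-- Loop invariant: the counter ends at c plus (elements of l) minus (new distinct keys added by l to d.keys).
theorem pvLoopA_eq (l : List Char) : ∀ (s : Int) (d : PySem.Dict Char Int) (c : Int),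
    ((PySem.List.enumerate l s).foldl pvStepA (d, c)).2
      = c + (l.length : Int) - ((PySem.Set.update d.keys l).length : Int) + (d.keys.length : Int) := by
  induction l with
  | nil => intro s d c; simp [PySem.List.enumerate_nil, PySem.Set.update]
  | cons x rest ih =>
    intro s d c
    rw [PySem.List.enumerate_cons, List.foldl_cons]
    show ((PySem.List.enumerate rest (s+1)).foldl pvStepA
        (d.insert x s, if d.contains x then c + 1 else c)).2 = _
    rw [ih]
    have hupd : PySem.Set.update d.keys (x :: rest)
        = PySem.Set.update (PySem.Set.add d.keys x) rest := by
      simp [PySem.Set.update]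
    by_cases h : d.contains x = true
    · have hk : (d.insert x s).keys = d.keys := PySem.Dict.keys_insert_of_contains (d := d) (k := x) (v := s) h
      have hadd : PySem.Set.add d.keys x = d.keys := by
        have : PySem.Set.contains d.keys x = true := by
          have := (PySem.Dict.contains_iff_mem_keys (d := d) (k := x)).mp h
          simpa [PySem.Set.contains] using this
        simp [PySem.Set.add, PySem.Set.contains] at this ⊢
        simp [this]
      rw [hk, hupd, hadd, h]
      push_cast
      simp
      ring
    · have h' : d.contains x = false := by simpa using h
      have hk : (d.insert x s).keys = d.keys ++ [x] :=
        PySem.Dict.keys_insert_of_not_contains (d := d) (k := x) (v := s) h'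
      have hadd : PySem.Set.add d.keys x = d.keys ++ [x] := by
        have : PySem.Set.contains d.keys x = false := by
          by_contra hc
          have hc' : PySem.Set.contains d.keys x = true := by
            cases hx : PySem.Set.contains d.keys x
            · exact absurd hx hc
            · rfl
          have : x ∈ d.keys := by simpa [PySem.Set.contains] using hc'
          exact absurd ((PySem.Dict.contains_iff_mem_keys (d := d) (k := x)).mpr this)
            (by simp [h'])
        simp [PySem.Set.add, PySem.Set.contains] at this ⊢
        simp [this]
      rw [hk, hupd, hadd, h']
      push_cast
      simp
      ring

-- ===== VERDICT (by name: the statement is the Claim_ definition above) =====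
theorem count_repeating_letters_spec : Claim_equal_count_repeating_letters := by
  unfold Claim_equal_count_repeating_letters
  intro word _
  unfold Spec_count_repeating_letters count_repeating_letters count_repeating_letters_alt
  rw [pvLoopA_eq]
  have : PySem.Set.update (PySem.Dict.empty : PySem.Dict Char Int).keys word.toList
      = PySem.Set.ofList word.toList := by
    simp [PySem.Set.update, PySem.Set.ofList_eq_foldl, PySem.Dict.keys_empty]
  rw [this]
  simp [PySem.Dict.keys_empty]
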